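-- pv_equiv track=rewrite | github.com/nuttastic123/misc_python | coins.py | flip_coins
-- ===== SOURCE A (Python) =====
-- def flip_coins(num_coins):
--     coins = ['heads'] * num_coins
--
--     for i in range(num_coins):
--         if (i + 1) % 2 == 0:
--             coins[i] = 'tails' if coins[i] == 'heads' else 'heads'
--
--         if (i + 1) % 3 == 0:
--             coins[i] = 'tails' if coins[i] == 'heads' else 'heads'
--
--     return coins
-- ===== SOURCE B (Python) =====
-- _PATTERN = ['heads', 'tails', 'tails', 'tails', 'heads', 'heads']
--
--
-- def flip_coins(num_coins):
--     # Final states repeat with period lcm(2,3)=6: read them off a fixed table.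
--     return [_PATTERN[i % 6] for i in range(num_coins)]
-- ===== Notes on version B (the rewrite author's own statement) =====
-- stated objective: simpler
-- what changed: Replaces the per-coin double-toggle simulation over a mutable list with a direct lookup in a precomputed period-6 table of final states.
import Mathlib
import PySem

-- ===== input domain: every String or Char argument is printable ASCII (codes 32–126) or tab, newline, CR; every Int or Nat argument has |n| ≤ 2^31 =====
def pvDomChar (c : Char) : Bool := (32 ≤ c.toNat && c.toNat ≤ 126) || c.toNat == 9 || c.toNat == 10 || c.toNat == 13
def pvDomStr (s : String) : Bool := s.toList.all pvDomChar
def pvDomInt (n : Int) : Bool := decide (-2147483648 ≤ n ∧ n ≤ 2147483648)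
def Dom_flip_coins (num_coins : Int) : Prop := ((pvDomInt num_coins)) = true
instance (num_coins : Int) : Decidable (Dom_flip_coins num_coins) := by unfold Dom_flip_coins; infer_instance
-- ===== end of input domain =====

-- B replaces A's per-coin double-toggle simulation with a lookup in a precomputed period-6 table (simpler).

-- ===== PORT A =====
-- 'tails' if coins[i] == 'heads' else 'heads'
def pvToggle (s : String) : String := if s == "heads" then "tails" else "heads"

-- one iteration of A's loop body; coins[i] is in range whenever A reads it,
-- so the .getD default is never observed
def flip_coins_step (coins : List String) (i : Int) : List String :=
  let coins := if PySem.Int.mod (i + 1) 2 == 0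
    then coins.set i.toNat (pvToggle (PySem.List.pyGetD coins i "heads"))
    else coins
  if PySem.Int.mod (i + 1) 3 == 0
    then coins.set i.toNat (pvToggle (PySem.List.pyGetD coins i "heads"))
    else coins

def flip_coins (num_coins : Int) : List String :=
  (PySem.List.pyRange 0 num_coins 1).foldl flip_coins_step
    (List.replicate num_coins.toNat "heads")

-- ===== PORT B =====
def pvPattern : List String := ["heads", "tails", "tails", "tails", "heads", "heads"]

def flip_coins_alt (num_coins : Int) : List String :=
  (PySem.List.pyRange 0 num_coins 1).map
    (fun i => pvPattern.getD (PySem.Int.mod i 6).toNat "heads")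

-- ===== PRECONDITION & SPEC =====
def Spec_flip_coins (num_coins : Int) (out : List String) : Prop := out = flip_coins_alt num_coins
instance (num_coins : Int) (out : List String) : Decidable (Spec_flip_coins num_coins out) := by unfold Spec_flip_coins; infer_instance

-- ===== CLAIM (what is proved, stated in full; the proofs are below) =====
def Claim_equal_flip_coins : Prop := ∀ (num_coins : Int), Dom_flip_coins num_coins → Spec_flip_coins num_coins (flip_coins num_coins)

-- ===== LEMMAS AND PROOFS =====

-- the value A's loop body produces at index i, starting from "heads"
def pvCell (i : Int) : String :=
  let s := if PySem.Int.mod (i + 1) 2 == 0 then pvToggle "heads" else "heads"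
  if PySem.Int.mod (i + 1) 3 == 0 then pvToggle s else s

lemma pvCell_eq_pattern (n : ℕ) :
    pvCell (n : Int) = pvPattern.getD (PySem.Int.mod (n : Int) 6).toNat "heads" := by
  have h2 : PySem.Int.mod ((n : Int) + 1) 2 = ((n + 1) % 2 : ℕ) := by
    exact_mod_cast PySem.Int.mod_natCast (n + 1) 2
  have h3 : PySem.Int.mod ((n : Int) + 1) 3 = ((n + 1) % 3 : ℕ) := by
    exact_mod_cast PySem.Int.mod_natCast (n + 1) 3
  have h6 : PySem.Int.mod (n : Int) 6 = ((n % 6 : ℕ) : Int) := PySem.Int.mod_natCast n 6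
  have e2 : (n + 1) % 2 = (n % 6 + 1) % 2 := by omega
  have e3 : (n + 1) % 3 = (n % 6 + 1) % 3 := by omega
  rw [pvCell, h2, h3, h6, e2, e3]
  have hr : n % 6 < 6 := Nat.mod_lt n (by omega)
  set r := n % 6 with hrdef
  clear_value r
  interval_cases r <;> decide

lemma flip_coins_step_split (n m : ℕ) (hm : n < m) (done : List String)
    (hlen : done.length = n) :
    flip_coins_step (done ++ List.replicate (m - n) "heads") (n : Int)
      = (done ++ [pvCell (n : Int)]) ++ List.replicate (m - (n + 1)) "heads" := by
  have hrep : List.replicate (m - n) "heads" = "heads" :: List.replicate (m - (n + 1)) "heads" := by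
    have : m - n = (m - (n + 1)) + 1 := by omega
    rw [this, List.replicate_succ]
  have hget : ∀ v : String,
      PySem.List.pyGetD (done ++ v :: List.replicate (m - (n + 1)) "heads") (n : Int) "heads" = v := by
    intro v
    rw [PySem.List.pyGetD_natCast]
    rw [List.getD_eq_getElem?_getD, List.getElem?_append_right (by omega)]
    simp [hlen]
  have hset : ∀ v w : String,
      (done ++ v :: List.replicate (m - (n + 1)) "heads").set n w
        = done ++ w :: List.replicate (m - (n + 1)) "heads" := by
    intro v w
    rw [List.set_append_right _ _ (by omega), hlen]
    simp
  rw [hrep, flip_coins_step, pvCell]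
  have hn : (n : Int).toNat = n := Int.toNat_natCast n
  by_cases h2 : PySem.Int.mod ((n : Int) + 1) 2 == 0 <;>
    by_cases h3 : PySem.Int.mod ((n : Int) + 1) 3 == 0 <;>
      simp only [h2, h3, if_true, if_false, hn, hget, hset, Bool.false_eq_true,
        List.append_assoc, List.cons_append, List.nil_append]

lemma flip_coins_fold (m : ℕ) : ∀ n : ℕ, n ≤ m →
    (PySem.List.pyRange 0 (n : Int) 1).foldl flip_coins_step (List.replicate m "heads")
      = ((PySem.List.pyRange 0 (n : Int) 1).map
          (fun i => pvPattern.getD (PySem.Int.mod i 6).toNat "heads"))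
        ++ List.replicate (m - n) "heads" := by
  intro n
  induction n with
  | zero => simp [PySem.List.pyRange_one_eq_nil]
  | succ k ih =>
    intro hk
    have hsplit : PySem.List.pyRange 0 ((k : Int) + 1) 1
        = PySem.List.pyRange 0 (k : Int) 1 ++ [(k : Int)] :=
      PySem.List.pyRange_one_succ_right (by omega)
    have hcast : ((k + 1 : ℕ) : Int) = (k : Int) + 1 := by push_cast; ring
    rw [hcast, hsplit, List.foldl_append, ih (by omega), List.map_append]
    have hlen : ((PySem.List.pyRange 0 (k : Int) 1).map
        (fun i => pvPattern.getD (PySem.Int.mod i 6).toNat "heads")).length = k := by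
      simp [PySem.List.length_pyRange_one]
    simp only [List.foldl_cons, List.foldl_nil]
    rw [flip_coins_step_split k m (by omega) _ hlen, pvCell_eq_pattern]
    simp

-- ===== VERDICT (by name: the statement is the Claim_ definition above) =====
theorem flip_coins_spec : Claim_equal_flip_coins := by
  intro n _
  unfold Spec_flip_coins flip_coins flip_coins_alt
  rcases le_or_gt n 0 with h | h
  · rw [PySem.List.pyRange_one_eq_nil h]
    simp [Int.toNat_of_nonpos h]
  · obtain ⟨k, rfl⟩ : ∃ k : ℕ, n = (k : Int) := ⟨n.toNat, (Int.toNat_of_nonneg h.le).symm⟩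
    rw [Int.toNat_natCast]
    rw [flip_coins_fold k k le_rfl]
    simp
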